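-- pv_equiv track=rewrite | github.com/ROCm/madengine | src/madengine/deployment/kubernetes.py | assign_pvc_subdirs_to_pods
-- ===== SOURCE A (Python) =====
-- from typing import Any, Dict, List, Optional
--
-- def match_pvc_subdir_to_k8s_pod(
--     pvc_subdir: str,
--     pod_names: List[str],
--     assigned: set,
-- ) -> Optional[str]:
--     """
--     Map one top-level name under /results/ to a full Kubernetes pod name.
--
--     Matches ``pod == pvc_subdir`` or ``pod.startswith(pvc_subdir + "-")`` among pods
--     not yet assigned. Prefer exact equality; if multiple prefix matches, pick the
--     first sorted name (deterministic).
--     """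
--     available = sorted(p for p in pod_names if p not in assigned)
--     exact = [p for p in available if p == pvc_subdir]
--     if exact:
--         return exact[0]
--     prefixed = [p for p in available if p.startswith(pvc_subdir + "-")]
--     if not prefixed:
--         return None
--     return sorted(prefixed)[0]
--
-- def assign_pvc_subdirs_to_pods(pod_dirs: List[str], pod_names: List[str]) -> Dict[str, str]:
--     """
--     Assign each PVC subdir to at most one pod. Process longest names first so
--     short prefixes do not steal pods (e.g. ``foo-0`` before ``foo``).
--     """
--     cleaned = [d.strip() for d in pod_dirs if d and d.strip()]
--     assigned: set = set()
--     mapping: Dict[str, str] = {}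
--     for pvc_subdir in sorted(cleaned, key=lambda x: (-len(x), x)):
--         m = match_pvc_subdir_to_k8s_pod(pvc_subdir, pod_names, assigned)
--         if m:
--             mapping[pvc_subdir] = m
--             assigned.add(m)
--     return mapping
-- ===== SOURCE B (Python) =====
-- import bisect
--
-- def assign_pvc_subdirs_to_pods(pod_dirs, pod_names):
--     cleaned = [d.strip() for d in pod_dirs if d and d.strip()]
--     remaining = sorted(set(pod_names))  # still-unassigned pods, kept sorted
--     mapping = {}
--     for d in sorted(cleaned, key=lambda x: (-len(x), x)):
--         key = d + "-"
--         i = bisect.bisect_left(remaining, d)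
--         if i < len(remaining) and remaining[i] == d:
--             mapping[d] = remaining.pop(i)
--         else:
--             j = bisect.bisect_left(remaining, key)
--             if j < len(remaining) and remaining[j].startswith(key):
--                 mapping[d] = remaining.pop(j)
--     return mapping
-- ===== Notes on version B (the rewrite author's own statement) =====
-- stated objective: faster
-- what changed: B keeps the still-unassigned pods as one shrinking sorted deduplicated list and serves each directory by binary search (bisect_left) -- an exact hit is the probe itself and the prefix matches form a contiguous run whose first element the probe lands on -- removing A's per-directory re-sort and linear filters and the assigned-set bookkeeping entirely.
import Mathlib
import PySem

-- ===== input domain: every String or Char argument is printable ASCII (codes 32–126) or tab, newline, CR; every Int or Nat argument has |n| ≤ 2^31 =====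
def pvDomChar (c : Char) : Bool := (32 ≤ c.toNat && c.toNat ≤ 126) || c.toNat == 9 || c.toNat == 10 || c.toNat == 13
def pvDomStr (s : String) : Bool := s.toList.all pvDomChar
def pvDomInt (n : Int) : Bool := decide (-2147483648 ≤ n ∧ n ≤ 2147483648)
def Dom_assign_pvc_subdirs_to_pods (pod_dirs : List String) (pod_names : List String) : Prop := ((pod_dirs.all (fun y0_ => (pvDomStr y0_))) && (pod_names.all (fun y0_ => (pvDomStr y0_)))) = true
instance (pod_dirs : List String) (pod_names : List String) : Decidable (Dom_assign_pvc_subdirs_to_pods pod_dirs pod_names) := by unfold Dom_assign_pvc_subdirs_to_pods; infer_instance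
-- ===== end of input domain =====

-- B keeps the still-unassigned pods as one shrinking sorted deduplicated list and serves
-- each directory by binary search (exact hit = the probe; prefix matches are a contiguous
-- run starting at the probe), replacing A's per-directory re-sort, linear filters and
-- assigned-set bookkeeping.

-- ===== PORT A =====
def match_pvc_subdir_to_k8s_pod (pvc_subdir : String) (pod_names : List String)
    (assigned : PySem.Set String) : Option String :=
  let available := PySem.List.sorted (pod_names.filter (fun p => !(PySem.Set.contains assigned p))) (fun x => x) false
  let exact := available.filter (fun p => p == pvc_subdir)
  match exact with
  | e :: _ => some e
  | [] =>
    let prefixed := available.filter (fun p => PySem.Chars.startswith p.toList (pvc_subdir.toList ++ ['-']))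
    match PySem.List.sorted prefixed (fun x => x) false with
    | [] => none
    | q :: _ => some q

def assign_pvc_subdirs_to_pods (pod_dirs : List String) (pod_names : List String) : List (String × String) :=
  let cleaned := (pod_dirs.filter (fun d => d ≠ "" && PySem.Str.strip d ≠ "")).map PySem.Str.strip
  let st := (PySem.List.sorted2 cleaned (fun x => -(PySem.Str.len x : Int)) (fun x => x) false).foldl
    (fun (st : PySem.Set String × PySem.Dict String String) pvc_subdir =>
      match match_pvc_subdir_to_k8s_pod pvc_subdir pod_names st.1 with
      | some m => if m = "" then st else (PySem.Set.add st.1 m, st.2.insert pvc_subdir m)  -- Python's `if m:` truthiness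
      | none => st)
    (PySem.Set.empty, PySem.Dict.empty)
  st.2.items

-- ===== PORT B =====
def assign_pvc_subdirs_to_pods_alt (pod_dirs : List String) (pod_names : List String) : List (String × String) :=
  let cleaned := (pod_dirs.filter (fun d => d ≠ "" && PySem.Str.strip d ≠ "")).map PySem.Str.strip
  let st := (PySem.List.sorted2 cleaned (fun x => -(PySem.Str.len x : Int)) (fun x => x) false).foldl
    (fun (st : List String × PySem.Dict String String) d =>
      let remaining := st.1
      let key := d ++ "-"
      let i := PySem.List.bisectLeft remaining d
      if remaining[i]?.any (fun p => p == d) then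
        match PySem.List.pop? remaining (i : Int) with
        | some (m, rest) => (rest, st.2.insert d m)
        | none => st  -- unreachable: i is in range here
      else
        let j := PySem.List.bisectLeft remaining key
        if remaining[j]?.any (fun p => PySem.Str.startswith p key) then
          match PySem.List.pop? remaining (j : Int) with
          | some (m, rest) => (rest, st.2.insert d m)
          | none => st  -- unreachable: j is in range here
        else st)
    (PySem.List.sorted (PySem.Set.ofList pod_names) (fun x => x) false, PySem.Dict.empty)
  st.2.items

-- ===== PRECONDITION & SPEC =====
def Spec_assign_pvc_subdirs_to_pods (pod_dirs : List String) (pod_names : List String) (out : List (String × String)) : Prop := out = assign_pvc_subdirs_to_pods_alt pod_dirs pod_names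
instance (pod_dirs : List String) (pod_names : List String) (out : List (String × String)) : Decidable (Spec_assign_pvc_subdirs_to_pods pod_dirs pod_names out) := by unfold Spec_assign_pvc_subdirs_to_pods; infer_instance

-- ===== CLAIM (what is proved, stated in full; the proofs are below) =====
def Claim_equal_assign_pvc_subdirs_to_pods : Prop := ∀ (pod_dirs : List String) (pod_names : List String), Dom_assign_pvc_subdirs_to_pods pod_dirs pod_names → Spec_assign_pvc_subdirs_to_pods pod_dirs pod_names (assign_pvc_subdirs_to_pods pod_dirs pod_names)

-- ===== LEMMAS AND PROOFS =====

-- the two loop bodies, named so the fold invariant can speak about them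
def pvStepA (pods : List String) (st : PySem.Set String × PySem.Dict String String) (pvc_subdir : String) :
    PySem.Set String × PySem.Dict String String :=
  match match_pvc_subdir_to_k8s_pod pvc_subdir pods st.1 with
  | some m => if m = "" then st else (PySem.Set.add st.1 m, st.2.insert pvc_subdir m)
  | none => st

def pvStepB (st : List String × PySem.Dict String String) (d : String) :
    List String × PySem.Dict String String :=
  let remaining := st.1
  let key := d ++ "-"
  let i := PySem.List.bisectLeft remaining d
  if remaining[i]?.any (fun p => p == d) then
    match PySem.List.pop? remaining (i : Int) with
    | some (m, rest) => (rest, st.2.insert d m)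
    | none => st
  else
    let j := PySem.List.bisectLeft remaining key
    if remaining[j]?.any (fun p => PySem.Str.startswith p key) then
      match PySem.List.pop? remaining (j : Int) with
      | some (m, rest) => (rest, st.2.insert d m)
      | none => st
    else st

-- PySem only states bisectLeft_spec for Int; this is the same spec over any linear order.
lemma pv_bisectLoop_spec {α : Type} [LinearOrder α] (xs : List α) (x : α)
    (hs : xs.Pairwise (· ≤ ·)) :
    ∀ (fuel lo hi : ℕ), lo ≤ hi → hi ≤ xs.length → hi - lo ≤ fuel →
      (∀ j (hj : j < xs.length), j < lo → xs[j] < x) →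
      (∀ j (hj : j < xs.length), hi ≤ j → x ≤ xs[j]) →
      lo ≤ PySem.List.bisectLeftLoop xs x fuel lo hi ∧
      PySem.List.bisectLeftLoop xs x fuel lo hi ≤ hi ∧
      (∀ j (hj : j < xs.length), j < PySem.List.bisectLeftLoop xs x fuel lo hi → xs[j] < x) ∧
      (∀ j (hj : j < xs.length), PySem.List.bisectLeftLoop xs x fuel lo hi ≤ j → x ≤ xs[j]) := by
  have hpw := List.pairwise_iff_getElem.mp hs
  intro fuel
  induction fuel with
  | zero =>
    intro lo hi hlohi hhile hfuel hlow hhigh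
    have : hi = lo := by omega
    subst this
    rw [PySem.List.bisectLeftLoop.eq_def]
    exact ⟨le_refl _, le_refl _, hlow, hhigh⟩
  | succ fuel ih =>
    intro lo hi hlohi hhile hfuel hlow hhigh
    rw [PySem.List.bisectLeftLoop.eq_def]
    by_cases hlt : lo < hi
    · simp only [if_pos hlt]
      have hmid : (lo + hi) / 2 < xs.length := by omega
      rw [List.getElem?_eq_getElem hmid]
      by_cases hy : xs[(lo + hi) / 2] < x
      · simp only [if_pos hy]
        have := ih ((lo + hi) / 2 + 1) hi (by omega) hhile (by omega)
          (fun j hj hjlt => by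
            rcases Nat.lt_or_ge j ((lo + hi) / 2) with h | h
            · exact lt_of_le_of_lt (hpw j _ hj hmid h) hy
            · have : j = (lo + hi) / 2 := by omega
              subst this; exact hy)
          hhigh
        exact ⟨by omega, this.2.1, this.2.2⟩
      · simp only [if_neg hy]
        have := ih lo ((lo + hi) / 2) (by omega) (by omega) (by omega) hlow
          (fun j hj hjge => by
            rcases Nat.lt_or_ge ((lo + hi) / 2) j with h | h
            · exact le_trans (not_lt.mp hy) (hpw _ j hmid hj h)
            · have : j = (lo + hi) / 2 := by omega
              subst this; exact not_lt.mp hy)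
        exact ⟨this.1, by omega, this.2.2⟩
    · simp only [if_neg hlt]
      have : lo = hi := by omega
      subst this
      exact ⟨le_refl _, le_refl _, hlow, hhigh⟩

lemma pv_bisect_spec {α : Type} [LinearOrder α] (xs : List α) (x : α)
    (hs : xs.Pairwise (· ≤ ·)) :
    PySem.List.bisectLeft xs x ≤ xs.length ∧
    (∀ j (hj : j < xs.length), j < PySem.List.bisectLeft xs x → xs[j] < x) ∧
    (∀ j (hj : j < xs.length), PySem.List.bisectLeft xs x ≤ j → x ≤ xs[j]) := by
  have := pv_bisectLoop_spec xs x hs xs.length 0 xs.length (Nat.zero_le _) (le_refl _)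
    (by omega) (by omega) (by omega)
  exact ⟨this.2.1, this.2.2⟩

-- on a strictly sorted list the probe for d lands exactly on d when d is present
lemma pv_bisect_exact (L : List String) (d : String) (hpw : L.Pairwise (· < ·)) (hd : d ∈ L) :
    L[PySem.List.bisectLeft L d]? = some d := by
  obtain ⟨t, ht, hLt⟩ := List.getElem_of_mem hd
  have hs := pv_bisect_spec L d (hpw.imp le_of_lt)
  have hpwg := List.pairwise_iff_getElem.mp hpw
  set i := PySem.List.bisectLeft L d with hi
  have hit : i ≤ t := by
    by_contra h
    have := hs.2.1 t ht (by omega)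
    rw [hLt] at this
    exact lt_irrefl _ this
  have hilen : i < L.length := by omega
  rw [List.getElem?_eq_getElem hilen]
  have h1 : d ≤ L[i] := hs.2.2 i hilen (le_refl _)
  have h2 : L[i] ≤ L[t] := by
    rcases Nat.lt_or_ge i t with h | h
    · exact le_of_lt (hpwg i t hilen ht h)
    · have : i = t := by omega
      subst this; exact le_refl _
  rw [hLt] at h2
  exact congrArg some (le_antisymm h2 h1)

-- a proper prefix extension is lexicographically above the prefix
lemma pv_not_lt_of_prefix (k b : List Char) (h : k <+: b) : ¬ b < k := by
  obtain ⟨t, rfl⟩ := h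
  induction k with
  | nil => intro hlt; cases hlt
  | cons c k' ih =>
    intro hlt
    rw [List.cons_append, List.cons_lt_cons_iff] at hlt
    rcases hlt with h | ⟨_, h⟩
    · exact lt_irrefl _ h
    · exact ih h

-- anything between a prefix key and a string carrying that prefix carries the prefix too
lemma pv_prefix_between (k : List Char) : ∀ (a b : List Char), k <+: b → ¬ a < k → ¬ b < a →
    k <+: a := by
  induction k with
  | nil => intro a b _ _ _; exact List.nil_prefix
  | cons c k' ih =>
    intro a b hb ha hba
    obtain ⟨t, hbt⟩ := hb
    cases a with
    | nil => exact absurd (List.nil_lt_cons _ _) ha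
    | cons x a' =>
      cases b with
      | nil => simp at hbt
      | cons y b' =>
        rw [List.cons_append, List.cons.injEq] at hbt
        obtain ⟨rfl, hbt⟩ := hbt
        rcases lt_trichotomy x c with h | h | h
        · exact absurd (List.cons_lt_cons_iff.mpr (Or.inl h)) ha
        · subst h
          have ha' : ¬ a' < k' := fun hh => ha (List.cons_lt_cons_iff.mpr (Or.inr ⟨rfl, hh⟩))
          have hba' : ¬ b' < a' := fun hh => hba (List.cons_lt_cons_iff.mpr (Or.inr ⟨rfl, hh⟩))
          exact List.cons_prefix_cons.mpr ⟨rfl, ih a' b' ⟨t, hbt⟩ ha' hba'⟩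
        · exact absurd (List.cons_lt_cons_iff.mpr (Or.inl h)) hba

lemma pv_pred_not_lt (p key : String) (h : PySem.Chars.startswith p.toList key.toList = true) :
    ¬ p < key := by
  rw [PySem.Chars.startswith_iff] at h
  rw [String.lt_iff_toList_lt]
  exact pv_not_lt_of_prefix _ _ h

lemma pv_pred_between (x y key : String) (hy : PySem.Chars.startswith y.toList key.toList = true)
    (hx : ¬ x < key) (hxy : x ≤ y) : PySem.Chars.startswith x.toList key.toList = true := by
  rw [PySem.Chars.startswith_iff] at hy ⊢
  refine pv_prefix_between _ _ y.toList hy ?_ ?_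
  · rw [← String.lt_iff_toList_lt]; exact hx
  · rw [← String.lt_iff_toList_lt]; exact not_lt.mpr hxy

-- first match = the probe, when the probe satisfies the prefix predicate
lemma pv_find_at_probe (L : List String) (key : String) (p : String)
    (hpw : L.Pairwise (· < ·))
    (hp : L[PySem.List.bisectLeft L key]? = some p)
    (hpred : PySem.Chars.startswith p.toList key.toList = true) :
    L.find? (fun q => PySem.Chars.startswith q.toList key.toList) = some p := by
  have hs := pv_bisect_spec L key (hpw.imp le_of_lt)
  set i := PySem.List.bisectLeft L key with hi
  have hilen : i < L.length := by
    by_contra h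
    rw [List.getElem?_eq_none (by omega)] at hp
    cases hp
  rw [List.getElem?_eq_getElem hilen] at hp
  rw [List.find?_eq_some_iff_getElem]
  refine ⟨hpred, i, hilen, Option.some.inj hp, ?_⟩
  intro j hj
  have hjlt : L[j] < key := hs.2.1 j (by omega) hj
  rw [Bool.not_eq_eq_eq_not, Bool.not_true]
  by_contra h
  have := pv_pred_not_lt L[j] key (by revert h; simp)
  exact this hjlt

-- no match at the probe ⇒ no match at all
lemma pv_find_none (L : List String) (key : String)
    (hpw : L.Pairwise (· < ·))
    (hp : ∀ p, L[PySem.List.bisectLeft L key]? = some p →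
          PySem.Chars.startswith p.toList key.toList = false) :
    L.find? (fun q => PySem.Chars.startswith q.toList key.toList) = none := by
  have hs := pv_bisect_spec L key (hpw.imp le_of_lt)
  have hpwg := List.pairwise_iff_getElem.mp hpw
  set i := PySem.List.bisectLeft L key with hi
  rw [List.find?_eq_none]
  intro x hx hxpred
  obtain ⟨t, ht, hLt⟩ := List.getElem_of_mem hx
  have hti : i ≤ t := by
    by_contra h
    have := hs.2.1 t ht (by omega)
    rw [hLt] at this
    exact pv_pred_not_lt x key hxpred this
  have hilen : i < L.length := by omega
  have hfalse := hp L[i] (List.getElem?_eq_getElem hilen)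
  have hle : L[i] ≤ L[t] := by
    rcases Nat.lt_or_ge i t with h | h
    · exact le_of_lt (hpwg i t hilen ht h)
    · have : i = t := by omega
      subst this; exact le_refl _
  rw [hLt] at hle
  have : PySem.Chars.startswith L[i].toList key.toList = true :=
    pv_pred_between L[i] x key hxpred (not_lt.mpr (hs.2.2 i hilen (le_refl _))) hle
  rw [hfalse] at this
  cases this

-- A's helper, characterised (exact-match test, else first sorted unassigned prefix match)
lemma match_eq (d : String) (pods : List String) (assigned : PySem.Set String) :
    match_pvc_subdir_to_k8s_pod d pods assigned =
      (if PySem.Set.contains (PySem.Set.ofList pods) d && !(PySem.Set.contains assigned d) then some d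
       else (PySem.List.sorted pods (fun x => x) false).find?
              (fun p => !(PySem.Set.contains assigned p) && PySem.Chars.startswith p.toList (d.toList ++ ['-']))) := by
  simp only [match_pvc_subdir_to_k8s_pod]
  by_cases hc : (PySem.Set.contains (PySem.Set.ofList pods) d && !(PySem.Set.contains assigned d)) = true
  · rw [if_pos hc]
    rw [Bool.and_eq_true] at hc
    have hdp : d ∈ pods := by
      have := hc.1; rw [PySem.Set.contains_iff, PySem.Set.mem_ofList] at this; exact this
    have hd : d ∈ (PySem.List.sorted (pods.filter (fun p => !(PySem.Set.contains assigned p))) (fun x => x) false).filter (fun p => p == d) := by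
      rw [List.mem_filter, PySem.List.mem_sorted, List.mem_filter]
      exact ⟨⟨hdp, hc.2⟩, by simp⟩
    cases hE : (PySem.List.sorted (pods.filter (fun p => !(PySem.Set.contains assigned p))) (fun x => x) false).filter (fun p => p == d) with
    | nil => rw [hE] at hd; cases hd
    | cons e t =>
      have he : e = d := by
        have : e ∈ (PySem.List.sorted (pods.filter (fun p => !(PySem.Set.contains assigned p))) (fun x => x) false).filter (fun p => p == d) := by
          rw [hE]; exact List.mem_cons_self
        rw [List.mem_filter] at this
        exact eq_of_beq this.2
      simpa using he
  · rw [if_neg hc]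
    have hE : (PySem.List.sorted (pods.filter (fun p => !(PySem.Set.contains assigned p))) (fun x => x) false).filter (fun p => p == d) = [] := by
      rw [List.filter_eq_nil_iff]
      intro p hp hpd
      rw [PySem.List.mem_sorted, List.mem_filter] at hp
      have hpd' : p = d := eq_of_beq hpd
      subst hpd'
      apply hc
      rw [Bool.and_eq_true]
      exact ⟨by rw [PySem.Set.contains_iff, PySem.Set.mem_ofList]; exact hp.1, hp.2⟩
    rw [hE]
    have hkey : PySem.List.sorted ((PySem.List.sorted (pods.filter (fun p => !(PySem.Set.contains assigned p))) (fun x => x) false).filter (fun p => PySem.Chars.startswith p.toList (d.toList ++ ['-']))) (fun x => x) false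
        = (PySem.List.sorted pods (fun x => x) false).filter (fun p => !(PySem.Set.contains assigned p) && PySem.Chars.startswith p.toList (d.toList ++ ['-'])) := by
      have hpw1 : ((PySem.List.sorted (pods.filter (fun p => !(PySem.Set.contains assigned p))) (fun x => x) false).filter (fun p => PySem.Chars.startswith p.toList (d.toList ++ ['-']))).Pairwise (fun a b : String => a ≤ b) :=
        List.Pairwise.filter _ (PySem.List.sorted_pairwise _ _)
      rw [show PySem.List.sorted ((PySem.List.sorted (pods.filter (fun p => !(PySem.Set.contains assigned p))) (fun x => x) false).filter (fun p => PySem.Chars.startswith p.toList (d.toList ++ ['-']))) (fun x => x) false = (PySem.List.sorted (pods.filter (fun p => !(PySem.Set.contains assigned p))) (fun x => x) false).filter (fun p => PySem.Chars.startswith p.toList (d.toList ++ ['-'])) from PySem.List.sorted_eq_self_of_pairwise _ _ hpw1]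
      refine PySem.List.eq_of_perm_of_pairwise_le_of_injective (fun x : String => x) Function.injective_id ?_ hpw1 (List.Pairwise.filter _ (PySem.List.sorted_pairwise _ _))
      refine List.Perm.trans (List.Perm.filter _ (PySem.List.sorted_perm _ _ _)) ?_
      rw [List.filter_filter]
      refine List.Perm.trans ?_ (List.Perm.filter _ (PySem.List.sorted_perm _ _ _)).symm
      rw [List.filter_congr (fun a _ => Bool.and_comm _ _)]
    rw [hkey, ← List.head?_filter]
    cases hL : (PySem.List.sorted pods (fun x => x) false).filter (fun p => !(PySem.Set.contains assigned p) && PySem.Chars.startswith p.toList (d.toList ++ ['-'])) with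
    | nil => rfl
    | cons a l => rfl

-- two ≤-sorted lists with the same members have the same first match
lemma pv_find_eq_of_mem_iff (L1 L2 : List String) (q : String → Bool)
    (h1 : L1.Pairwise (· ≤ ·)) (h2 : L2.Pairwise (· ≤ ·))
    (hmem : ∀ x, x ∈ L1 ↔ x ∈ L2) : L1.find? q = L2.find? q := by
  rw [← List.head?_filter, ← List.head?_filter]
  have hf1 : (L1.filter q).Pairwise (fun a b : String => a ≤ b) := List.Pairwise.filter _ h1
  have hf2 : (L2.filter q).Pairwise (fun a b : String => a ≤ b) := List.Pairwise.filter _ h2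
  have hfm : ∀ x, x ∈ L1.filter q ↔ x ∈ L2.filter q := by
    intro x; rw [List.mem_filter, List.mem_filter, hmem]
  cases hF1 : L1.filter q with
  | nil =>
    cases hF2 : L2.filter q with
    | nil => rfl
    | cons b t2 =>
      have : b ∈ L1.filter q := (hfm b).mpr (by rw [hF2]; exact List.mem_cons_self)
      rw [hF1] at this; cases this
  | cons a t1 =>
    cases hF2 : L2.filter q with
    | nil =>
      have : a ∈ L2.filter q := (hfm a).mp (by rw [hF1]; exact List.mem_cons_self)
      rw [hF2] at this; cases this
    | cons b t2 =>
      have hba : b ≤ a := by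
        have : a ∈ L2.filter q := (hfm a).mp (by rw [hF1]; exact List.mem_cons_self)
        rw [hF2] at this
        rcases List.mem_cons.mp this with h | h
        · exact le_of_eq h.symm
        · rw [hF2] at hf2; exact List.rel_of_pairwise_cons hf2 h
      have hab : a ≤ b := by
        have : b ∈ L1.filter q := (hfm b).mpr (by rw [hF2]; exact List.mem_cons_self)
        rw [hF1] at this
        rcases List.mem_cons.mp this with h | h
        · exact le_of_eq h.symm
        · rw [hF1] at hf1; exact List.rel_of_pairwise_cons hf1 h
      simp [le_antisymm hab hba]

-- removing the (unique) element found at a known index is a filter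
lemma pv_eraseIdx_eq_filter (L : List String) : ∀ (i : ℕ) (m : String),
    L.Nodup → L[i]? = some m → L.eraseIdx i = L.filter (fun p => !(p == m)) := by
  induction L with
  | nil => intro i m _ h; simp at h
  | cons x t ih =>
    intro i m hnd hi
    cases i with
    | zero =>
      simp only [List.getElem?_cons_zero, Option.some.injEq] at hi
      subst hi
      rw [List.eraseIdx_cons_zero, List.filter_cons]
      simp only [beq_self_eq_true, Bool.not_true, Bool.false_eq_true, if_false]
      symm
      rw [List.filter_eq_self]
      intro a ha
      have hax : a ≠ x := fun h => (List.nodup_cons.mp hnd).1 (h ▸ ha)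
      simp [hax]
    | succ n =>
      simp only [List.getElem?_cons_succ] at hi
      have hmt : m ∈ t := List.mem_of_getElem? hi
      have hxm : (!(x == m)) = true := by
        have : x ≠ m := fun h => (List.nodup_cons.mp hnd).1 (h ▸ hmt)
        simp [this]
      rw [List.eraseIdx_cons_succ, List.filter_cons, if_pos hxm]
      rw [ih n m (List.nodup_cons.mp hnd).2 hi]

-- the fold invariant: B's list is exactly the still-unassigned pods, sorted, deduplicated
def pvRel (pods : List String) (a : PySem.Set String × PySem.Dict String String)
    (b : List String × PySem.Dict String String) : Prop :=
  b.1 = (PySem.List.sorted (PySem.Set.ofList pods) (fun x => x) false).filter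
          (fun p => !(PySem.Set.contains a.1 p)) ∧ b.2 = a.2

lemma pv_contains_add (st : PySem.Set String) (x p : String) :
    PySem.Set.contains (PySem.Set.add st x) p = (PySem.Set.contains st p || p == x) := by
  rw [Bool.eq_iff_iff, PySem.Set.contains_iff, Bool.or_eq_true, PySem.Set.contains_iff, beq_iff_eq]
  exact PySem.Set.mem_add st x p

lemma pv_remaining_step (pods : List String) (st : PySem.Set String) (m : String) (k : ℕ)
    (hk : ((PySem.List.sorted (PySem.Set.ofList pods) (fun x => x) false).filter
            (fun p => !(PySem.Set.contains st p)))[k]? = some m) :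
    (PySem.List.sorted (PySem.Set.ofList pods) (fun x => x) false).filter
        (fun p => !(PySem.Set.contains (PySem.Set.add st m) p))
      = ((PySem.List.sorted (PySem.Set.ofList pods) (fun x => x) false).filter
          (fun p => !(PySem.Set.contains st p))).eraseIdx k := by
  have hpw : ((PySem.List.sorted (PySem.Set.ofList pods) (fun x => x) false).filter
      (fun p => !(PySem.Set.contains st p))).Pairwise (· < ·) :=
    List.Pairwise.filter _ (PySem.List.sorted_ofList_pairwise_lt pods)
  rw [pv_eraseIdx_eq_filter _ k m (hpw.imp ne_of_lt) hk, List.filter_filter]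
  refine List.filter_congr ?_
  intro p _
  rw [pv_contains_add]
  cases PySem.Set.contains st p <;> cases hpm : (p == m) <;> simp

lemma pv_step (pods : List String) (d : String) (hd : d ≠ "")
    (a : PySem.Set String × PySem.Dict String String)
    (b : List String × PySem.Dict String String) (hrel : pvRel pods a b) :
    pvRel pods (pvStepA pods a d) (pvStepB b d) := by
  obtain ⟨hb1, hb2⟩ := hrel
  have hRpw : (PySem.List.sorted (PySem.Set.ofList pods) (fun x => x) false).Pairwise (· < ·) :=
    PySem.List.sorted_ofList_pairwise_lt pods
  have hLpw : b.1.Pairwise (· < ·) := hb1 ▸ List.Pairwise.filter _ hRpw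
  have hmemL : ∀ p, p ∈ b.1 ↔ (p ∈ pods ∧ ¬ (PySem.Set.contains a.1 p = true)) := by
    intro p
    rw [hb1, List.mem_filter, PySem.List.mem_sorted, PySem.Set.mem_ofList, Bool.not_eq_eq_eq_not, Bool.not_true, Bool.eq_false_iff, ne_eq]
  have hkeyL : (d ++ "-").toList = d.toList ++ ['-'] := by
    rw [String.toList_append]; rfl
  -- A's candidate, via match_eq, then branch on whether d itself is still available
  unfold pvStepA pvStepB
  rw [match_eq]
  by_cases hdL : d ∈ b.1
  · -- exact hit: both sides take pod d
    have hA : (PySem.Set.contains (PySem.Set.ofList pods) d && !(PySem.Set.contains a.1 d)) = true := by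
      rw [Bool.and_eq_true, PySem.Set.contains_iff, PySem.Set.mem_ofList, Bool.not_eq_eq_eq_not, Bool.not_true, Bool.eq_false_iff, ne_eq]
      exact (hmemL d).mp hdL
    rw [if_pos hA]
    have hprobe : b.1[PySem.List.bisectLeft b.1 d]? = some d := pv_bisect_exact b.1 d hLpw hdL
    have hlen : PySem.List.bisectLeft b.1 d < b.1.length := by
      by_contra h
      rw [List.getElem?_eq_none (by omega)] at hprobe; cases hprobe
    simp only [hprobe, Option.any_some, if_pos (beq_self_eq_true d), if_neg hd]
    rw [PySem.List.pop?_natCast b.1 _ hlen]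
    have hval : b.1[PySem.List.bisectLeft b.1 d] = d := by
      rw [List.getElem?_eq_getElem hlen] at hprobe; exact Option.some.inj hprobe
    refine ⟨?_, by simp [hval, hb2]⟩
    show b.1.eraseIdx (PySem.List.bisectLeft b.1 d) = _
    rw [hb1] at hprobe ⊢
    exact (pv_remaining_step pods a.1 d _ hprobe).symm
  · -- no exact hit: A falls back to the first prefix match, B probes at the key
    have hA : (PySem.Set.contains (PySem.Set.ofList pods) d && !(PySem.Set.contains a.1 d)) = false := by
      rw [Bool.eq_false_iff, ne_eq, Bool.and_eq_true, PySem.Set.contains_iff, PySem.Set.mem_ofList, Bool.not_eq_eq_eq_not, Bool.not_true, Bool.eq_false_iff, ne_eq]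
      intro h; exact hdL ((hmemL d).mpr h)
    simp only [hA, Bool.false_eq_true, if_false]
    have hBexact : (b.1[PySem.List.bisectLeft b.1 d]?.any (fun p => p == d)) = false := by
      cases hp : b.1[PySem.List.bisectLeft b.1 d]? with
      | none => rfl
      | some p =>
        rw [Option.any_some]
        rw [Bool.eq_false_iff, ne_eq, beq_iff_eq]
        intro h; subst h
        exact hdL (List.mem_of_getElem? hp)
    simp only [hBexact, Bool.false_eq_true, if_false]
    -- A's find? over the freshly sorted pod list = find? over B's remaining list
    have hfindL : (PySem.List.sorted pods (fun x => x) false).find?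
          (fun p => !(PySem.Set.contains a.1 p) && PySem.Chars.startswith p.toList (d.toList ++ ['-']))
        = b.1.find? (fun q => PySem.Chars.startswith q.toList (d ++ "-").toList) := by
      rw [hb1, List.find?_filter]
      have h2 : (fun p : String => decide ((!(PySem.Set.contains a.1 p)) = true ∧ PySem.Chars.startswith p.toList (d ++ "-").toList = true))
          = (fun p : String => !(PySem.Set.contains a.1 p) && PySem.Chars.startswith p.toList (d.toList ++ ['-'])) := by
        funext p
        rw [hkeyL]
        cases PySem.Set.contains a.1 p <;> cases PySem.Chars.startswith p.toList (d.toList ++ ['-']) <;> simp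
      rw [h2]
      refine pv_find_eq_of_mem_iff _ _ _ ?_ ?_ ?_
      · exact PySem.List.sorted_pairwise pods (fun x => x)
      · exact PySem.List.sorted_pairwise (PySem.Set.ofList pods) (fun x => x)
      · intro x
        rw [PySem.List.mem_sorted, PySem.List.mem_sorted, PySem.Set.mem_ofList]
    cases hp : b.1[PySem.List.bisectLeft b.1 (d ++ "-")]? with
    | some p =>
      have hlen : PySem.List.bisectLeft b.1 (d ++ "-") < b.1.length := by
        by_contra h
        rw [List.getElem?_eq_none (by omega)] at hp; cases hp
      by_cases hpred : PySem.Str.startswith p (d ++ "-") = true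
      · -- prefix hit at the probe
        have hpred' : PySem.Chars.startswith p.toList (d ++ "-").toList = true := by
          rw [← PySem.Str.startswith_eq]; exact hpred
        rw [hfindL, pv_find_at_probe b.1 (d ++ "-") p hLpw hp hpred']
        have hne : p ≠ "" := by
          have hpre : (d ++ "-").toList <+: p.toList := (PySem.Chars.startswith_iff _ _).mp hpred'
          intro h; subst h
          rw [hkeyL] at hpre
          have := hpre.length_le
          simp at this
        rw [PySem.List.pop?_natCast b.1 _ hlen]
        simp only [Option.any_some, hpred, reduceIte, if_neg hne]
        have hval : b.1[PySem.List.bisectLeft b.1 (d ++ "-")] = p := by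
          rw [List.getElem?_eq_getElem hlen] at hp; exact Option.some.inj hp
        refine ⟨?_, by simp [hval, hb2]⟩
        show b.1.eraseIdx (PySem.List.bisectLeft b.1 (d ++ "-")) = _
        rw [hb1] at hp ⊢
        exact (pv_remaining_step pods a.1 p _ hp).symm
      · -- the probe does not carry the prefix: nothing matches at all
        have hnone : b.1.find? (fun q => PySem.Chars.startswith q.toList (d ++ "-").toList) = none := by
          refine pv_find_none b.1 (d ++ "-") hLpw ?_
          intro q hq
          rw [hp] at hq
          have : p = q := Option.some.inj hq
          subst this
          rw [← PySem.Str.startswith_eq]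
          exact Bool.eq_false_iff.mpr hpred
        rw [hfindL, hnone]
        simp only [Option.any_some]
        simp only [Bool.eq_false_iff.mpr (fun h => hpred h), Bool.false_eq_true, if_false]
        exact ⟨hb1, hb2⟩
    | none =>
      have hnone : b.1.find? (fun q => PySem.Chars.startswith q.toList (d ++ "-").toList) = none := by
        refine pv_find_none b.1 (d ++ "-") hLpw ?_
        intro q hq
        rw [hp] at hq; cases hq
      rw [hfindL, hnone]
      simp only [Option.any_none, Bool.false_eq_true, if_false]
      exact ⟨hb1, hb2⟩

lemma pv_fold (pods : List String) (ds : List String) (hds : ∀ d ∈ ds, d ≠ "") :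
    ∀ (a : PySem.Set String × PySem.Dict String String)
      (b : List String × PySem.Dict String String), pvRel pods a b →
      pvRel pods (ds.foldl (pvStepA pods) a) (ds.foldl pvStepB b) := by
  induction ds with
  | nil => intro a b h; simpa using h
  | cons d t ih =>
    intro a b h
    exact ih (fun x hx => hds x (List.mem_cons_of_mem _ hx)) _ _
      (pv_step pods d (hds d List.mem_cons_self) a b h)

-- ===== VERDICT (by name: the statement is the Claim_ definition above) =====
theorem assign_pvc_subdirs_to_pods_spec : Claim_equal_assign_pvc_subdirs_to_pods := by
  intro pod_dirs pod_names _
  unfold Spec_assign_pvc_subdirs_to_pods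
  show ((PySem.List.sorted2 ((pod_dirs.filter (fun d => d ≠ "" && PySem.Str.strip d ≠ "")).map PySem.Str.strip) (fun x => -(PySem.Str.len x : Int)) (fun x => x) false).foldl
          (pvStepA pod_names) (PySem.Set.empty, PySem.Dict.empty)).2.items
      = ((PySem.List.sorted2 ((pod_dirs.filter (fun d => d ≠ "" && PySem.Str.strip d ≠ "")).map PySem.Str.strip) (fun x => -(PySem.Str.len x : Int)) (fun x => x) false).foldl
          pvStepB (PySem.List.sorted (PySem.Set.ofList pod_names) (fun x => x) false, PySem.Dict.empty)).2.items
  have hds : ∀ d ∈ PySem.List.sorted2 ((pod_dirs.filter (fun d => d ≠ "" && PySem.Str.strip d ≠ "")).map PySem.Str.strip) (fun x => -(PySem.Str.len x : Int)) (fun x => x) false, d ≠ "" := by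
    intro d hdmem
    have hdcl : d ∈ (pod_dirs.filter (fun d => d ≠ "" && PySem.Str.strip d ≠ "")).map PySem.Str.strip :=
      (PySem.List.sorted2_perm _ _ _ _).mem_iff.mp hdmem
    rw [List.mem_map] at hdcl
    obtain ⟨d', hd', rfl⟩ := hdcl
    rw [List.mem_filter, Bool.and_eq_true] at hd'
    simpa using hd'.2.2
  have h0 : pvRel pod_names (PySem.Set.empty, PySem.Dict.empty)
      (PySem.List.sorted (PySem.Set.ofList pod_names) (fun x => x) false, PySem.Dict.empty) := by
    constructor
    · simp [PySem.Set.empty, PySem.Set.contains]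
    · rfl
  have := pv_fold pod_names _ hds _ _ h0
  exact congrArg PySem.Dict.items this.2.symm
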